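-- pv_equiv track=rewrite | github.com/sueminPark/Alogorithm | 프로그래머스/unrated/120849. 모음 제거/모음 제거.py | solution
-- ===== SOURCE A (Python) =====
-- def solution(my_string):
--     ans = ''
--     for i in range(len(my_string)):
--         if my_string[i] in 'aeiou':
--             ans += ''
--         else:
--             ans += my_string[i]
--
--     return ans
-- ===== SOURCE B (Python) =====
-- def solution(my_string):
--     result = my_string
--     for v in 'aeiou':
--         result = result.replace(v, '')
--     return result
-- ===== Notes on version B (the rewrite author's own statement) =====
-- stated objective: faster
-- what changed: B loops over the five vowels doing whole-string str.replace passes instead of A's character-by-character index scan that concatenates non-vowels one at a time.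
import Mathlib
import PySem

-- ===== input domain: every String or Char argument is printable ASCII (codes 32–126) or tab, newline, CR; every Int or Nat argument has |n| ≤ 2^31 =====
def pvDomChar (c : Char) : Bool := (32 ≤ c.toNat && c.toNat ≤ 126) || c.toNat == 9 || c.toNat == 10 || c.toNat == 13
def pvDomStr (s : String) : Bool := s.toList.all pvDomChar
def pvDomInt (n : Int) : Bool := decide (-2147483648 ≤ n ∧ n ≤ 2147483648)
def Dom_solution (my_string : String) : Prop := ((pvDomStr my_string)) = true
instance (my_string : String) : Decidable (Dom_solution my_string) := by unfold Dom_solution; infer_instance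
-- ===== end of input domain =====

-- B removes vowels with five str.replace passes (one per vowel) instead of A's per-character index scan; idiomatic, same result.

-- ===== PORT A =====
-- ans = ''; for i in range(len(my_string)): if my_string[i] in 'aeiou': ans += '' else: ans += my_string[i]
def solution (my_string : String) : String :=
  String.ofList <|
    (List.range my_string.toList.length).foldl
      (fun ans (i : Nat) =>
        match PySem.List.pyGet? my_string.toList ((i : Nat) : Int) with
        | some c =>
          if PySem.Chars.isIn [c] "aeiou".toList then ans ++ [] else ans ++ [c]
        | none => ans)
      []

-- ===== PORT B =====
-- result = my_string; for v in 'aeiou': result = result.replace(v, ''); return result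
def solution_alt (my_string : String) : String :=
  "aeiou".toList.foldl
    (fun result v => PySem.Str.replace result (String.ofList [v]) "") my_string

-- ===== PRECONDITION & SPEC =====
def Spec_solution (my_string : String) (out : String) : Prop := out = solution_alt my_string
instance (my_string : String) (out : String) : Decidable (Spec_solution my_string out) := by unfold Spec_solution; infer_instance

-- ===== CLAIM (what is proved, stated in full; the proofs are below) =====
def Claim_equal_solution : Prop := ∀ (my_string : String), Dom_solution my_string → Spec_solution my_string (solution my_string)

-- ===== LEMMAS AND PROOFS =====

-- replace.go with a single-char pattern and empty replacement is a filter
theorem replace_go_single (v : Char) :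
    ∀ (fuel : Nat) (l acc : List Char), l.length ≤ fuel →
      PySem.Chars.replace.go [v] [] fuel l acc
        = acc.reverse ++ l.filter (fun c => !(c == v)) := by
  intro fuel
  induction fuel with
  | zero =>
    intro l acc h
    have : l = [] := List.eq_nil_of_length_eq_zero (Nat.le_zero.mp h)
    subst this
    simp [PySem.Chars.replace.go]
  | succ n ih =>
    intro l acc h
    cases l with
    | nil => simp [PySem.Chars.replace.go]
    | cons c t =>
      simp only [PySem.Chars.replace.go]
      by_cases hc : c = v
      · subst hc
        rw [if_pos (by simp [List.isPrefixOf])]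
        simpa using ih t acc (Nat.le_of_succ_le_succ h)
      · rw [if_neg (by simp [List.isPrefixOf]; exact fun h' => hc h'.symm)]
        rw [ih t (c :: acc) (Nat.le_of_succ_le_succ h)]
        simp [hc]

theorem replace_single (v : Char) (cs : List Char) :
    PySem.Chars.replace cs [v] [] = cs.filter (fun c => !(c == v)) := by
  rw [PySem.Chars.replace]
  simp only [List.isEmpty]
  exact (replace_go_single v cs.length cs [] le_rfl).trans (by simp)

-- folding B's replace passes over strings, seen on toList
theorem foldl_replace_toList (vs : List Char) :
    ∀ (s : String),
      (vs.foldl (fun r v => PySem.Str.replace r (String.ofList [v]) "") s).toList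
        = vs.foldl (fun l v => l.filter (fun c => !(c == v))) s.toList := by
  induction vs with
  | nil => intro s; simp
  | cons v vs ih =>
    intro s
    simp only [List.foldl_cons]
    rw [ih]
    congr 1
    rw [PySem.Str.toList_replace]
    simp [replace_single]

-- successive single-vowel filters = one filter by non-membership
theorem foldl_filter_eq (vs : List Char) :
    ∀ (cs : List Char),
      vs.foldl (fun l v => l.filter (fun c => !(c == v))) cs
        = cs.filter (fun c => decide (c ∉ vs)) := by
  induction vs with
  | nil => intro cs; simp
  | cons v vs ih =>
    intro cs
    simp only [List.foldl_cons]
    rw [ih, List.filter_filter]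
    apply List.filter_congr
    intro c _
    by_cases h : c = v
    · simp [h]
    · by_cases h2 : c ∈ vs <;> simp [h, h2]

-- singleton infix ↔ membership
theorem singleton_infix_iff {c : Char} {l : List Char} : [c] <:+: l ↔ c ∈ l := by
  constructor
  · intro h
    exact h.sublist.subset (List.mem_singleton_self c)
  · intro h
    obtain ⟨s, t, rfl⟩ := List.append_of_mem h
    exact ⟨s, t, by simp⟩

-- A's index loop builds the same filter
theorem solutionA_loop (cs : List Char) :
    ∀ (n : Nat), n ≤ cs.length →
      (List.range n).foldl
        (fun ans (i : Nat) =>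
          match PySem.List.pyGet? cs ((i : Nat) : Int) with
          | some c =>
            if PySem.Chars.isIn [c] "aeiou".toList then ans ++ [] else ans ++ [c]
          | none => ans)
        []
      = (cs.take n).filter (fun c => !(PySem.Chars.isIn [c] "aeiou".toList)) := by
  intro n
  induction n with
  | zero => intro _; simp
  | succ n ih =>
    intro h
    have hn : n < cs.length := Nat.lt_of_succ_le h
    rw [List.range_succ, List.foldl_append, ih (Nat.le_of_lt hn)]
    simp only [List.foldl_cons, List.foldl_nil]
    rw [PySem.List.pyGet?_natCast, List.getElem?_eq_getElem hn]
    by_cases hv : PySem.Chars.isIn [cs[n]] "aeiou".toList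
    all_goals simp only [show "aeiou".toList = ['a', 'e', 'i', 'o', 'u'] from rfl] at hv ⊢
    all_goals rw [List.take_add_one, List.getElem?_eq_getElem hn, List.filter_append]
    · simp [hv]
    · simp [hv]

theorem solution_eq_alt (my_string : String) :
    solution my_string = solution_alt my_string := by
  have hA := solutionA_loop my_string.toList my_string.toList.length le_rfl
  have hB := foldl_replace_toList "aeiou".toList my_string
  rw [foldl_filter_eq] at hB
  have hpred : ∀ c : Char,
      (!(PySem.Chars.isIn [c] "aeiou".toList)) = decide (c ∉ "aeiou".toList) := by
    intro c
    have key : PySem.Chars.isIn [c] "aeiou".toList = true ↔ c ∈ "aeiou".toList :=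
      (PySem.Chars.isIn_iff_infix [c] "aeiou".toList).trans singleton_infix_iff
    by_cases h : c ∈ "aeiou".toList
    · have h5 : c = 'a' ∨ c = 'e' ∨ c = 'i' ∨ c = 'o' ∨ c = 'u' := by simpa using h
      rcases h5 with rfl | rfl | rfl | rfl | rfl <;> decide
    · rw [Bool.eq_false_iff.mpr (fun ht => h (key.mp ht))]
      simpa using h
  have hlist : (solution_alt my_string).toList
      = my_string.toList.filter (fun c => !(PySem.Chars.isIn [c] "aeiou".toList)) := by
    unfold solution_alt
    rw [hB]
    exact (List.filter_congr (fun c _ => (hpred c).symm))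
  unfold solution
  rw [hA, List.take_length, ← hlist, String.ofList_toList]

-- ===== VERDICT (by name: the statement is the Claim_ definition above) =====
theorem solution_spec : Claim_equal_solution := by
  intro s _
  exact solution_eq_alt s
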